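-- pv_equiv track=rewrite | github.com/AnneEjsing/Sentiment-Analysis-WI-Fall-19 | communities.py | compute_community_for_user
-- ===== SOURCE A (Python) =====
-- import collections
--
-- def compute_community_for_user(users, communities):
--     predictions = list(zip(users, communities))
--
--     communities = collections.defaultdict(list)
--     for p in predictions:
--         key, value = p
--         if key not in communities[value]:
--             communities[value].append(key)
--     return communities
-- ===== SOURCE B (Python) =====
-- import collections
--
-- def compute_community_for_user(users, communities):
--     pairs = list(zip(users, communities))
--     keys = list(dict.fromkeys([c for _, c in pairs]))
--     return collections.defaultdict(list, {
--         c: list(dict.fromkeys([u for u, cc in pairs if cc == c]))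
--         for c in keys})
-- ===== Notes on version B (the rewrite author's own statement) =====
-- stated objective: alternative
-- what changed: B removes A's stateful dict fold with its inline membership-and-append branch: it first lists the distinct communities in first-appearance order, then builds each group independently by filtering the zipped pairs for that community and deduplicating with dict.fromkeys.
import Mathlib
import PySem

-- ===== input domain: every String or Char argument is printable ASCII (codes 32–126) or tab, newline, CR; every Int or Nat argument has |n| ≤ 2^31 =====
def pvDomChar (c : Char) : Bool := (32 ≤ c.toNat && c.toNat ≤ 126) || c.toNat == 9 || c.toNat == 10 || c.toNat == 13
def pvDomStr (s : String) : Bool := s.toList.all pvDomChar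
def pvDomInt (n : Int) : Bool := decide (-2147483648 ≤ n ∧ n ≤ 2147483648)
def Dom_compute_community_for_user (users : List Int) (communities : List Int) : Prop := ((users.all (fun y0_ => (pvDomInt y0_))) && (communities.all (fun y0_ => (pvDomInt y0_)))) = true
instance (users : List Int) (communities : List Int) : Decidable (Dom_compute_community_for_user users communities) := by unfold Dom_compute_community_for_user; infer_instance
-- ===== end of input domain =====

-- B drops A's stateful dict fold entirely: it lists the distinct communities in first-appearance
-- order, then builds each group by filtering and deduplicating (objective: alternative decomposition).
-- Both return the dict's items; equivalence is about the returned mapping.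

-- ===== PORT A =====
-- for p in zip(users, communities): key, value = p; if key not in communities[value]: communities[value].append(key)
-- (defaultdict access communities[value] inserts the (possibly empty) list; append mutates it in place)
def compute_community_for_user (users : List Int) (communities : List Int) : List (Int × List Int) :=
  ((users.zip communities).foldl
    (fun d p =>
      let cur := d.getD p.2 []
      d.insert p.2 (if p.1 ∈ cur then cur else cur ++ [p.1]))
    PySem.Dict.empty).items

-- ===== PORT B =====
-- pairs = zip; keys = dict.fromkeys(c for _, c in pairs);
-- {c: list(dict.fromkeys(u for u, cc in pairs if cc == c)) for c in keys}
def compute_community_for_user_alt (users : List Int) (communities : List Int) : List (Int × List Int) :=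
  let pairs := users.zip communities
  let keys := PySem.List.dedup (pairs.map (fun p => p.2))
  keys.map (fun c =>
    (c, PySem.List.dedup ((pairs.filter (fun p => p.2 == c)).map (fun p => p.1))))

-- ===== PRECONDITION & SPEC =====
def Spec_compute_community_for_user (users : List Int) (communities : List Int) (out : List (Int × List Int)) : Prop := out = compute_community_for_user_alt users communities
instance (users : List Int) (communities : List Int) (out : List (Int × List Int)) : Decidable (Spec_compute_community_for_user users communities out) := by unfold Spec_compute_community_for_user; infer_instance

-- ===== CLAIM (what is proved, stated in full; the proofs are below) =====
def Claim_equal_compute_community_for_user : Prop := ∀ (users : List Int) (communities : List Int), Dom_compute_community_for_user users communities → Spec_compute_community_for_user users communities (compute_community_for_user users communities)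

-- ===== LEMMAS AND PROOFS =====

-- what A's fold stores at each key: the Set.add-fold of the users whose community is c
theorem getD_foldA (l : List (Int × Int)) (d : PySem.Dict Int (List Int)) (c : Int) :
    ((l.foldl
        (fun d p =>
          let cur := d.getD p.2 []
          d.insert p.2 (if p.1 ∈ cur then cur else cur ++ [p.1])) d).getD c []) =
    ((l.filter (fun p => p.2 == c)).map (fun p => p.1)).foldl PySem.Set.add (d.getD c []) := by
  induction l generalizing d with
  | nil => simp
  | cons p t ih =>
    simp only [List.foldl_cons, List.filter_cons]
    by_cases hpc : p.2 = c
    · subst hpc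
      simp only [beq_self_eq_true, if_true, List.map_cons, List.foldl_cons, ih]
      congr 1
      rw [PySem.Dict.getD_insert_self, PySem.Set.add_eq_ite]
    · have hb : (p.2 == c) = false := by simp [hpc]
      simp only [hb, Bool.false_eq_true, if_false, ih]
      congr 1
      exact PySem.Dict.getD_insert_of_ne _ _ _ (Ne.symm hpc)

-- ===== VERDICT (by name: the statement is the Claim_ definition above) =====
theorem compute_community_for_user_spec : Claim_equal_compute_community_for_user := by
  intro users communities _
  unfold Spec_compute_community_for_user compute_community_for_user compute_community_for_user_alt
  set l := users.zip communities with hl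
  have hnd : ((l.foldl
      (fun d p =>
        let cur := d.getD p.2 []
        d.insert p.2 (if p.1 ∈ cur then cur else cur ++ [p.1])) PySem.Dict.empty)).keys.Nodup := by
    exact PySem.Dict.nodup_keys_foldl_insert_key l (fun p => p.2)
      (fun d p => let cur := d.getD p.2 []; if p.1 ∈ cur then cur else cur ++ [p.1])
      PySem.Dict.empty (by simp [PySem.Dict.keys_empty])
  rw [PySem.Dict.items_eq_map_keys _ hnd []]
  have hkeys : ((l.foldl
      (fun d p =>
        let cur := d.getD p.2 []
        d.insert p.2 (if p.1 ∈ cur then cur else cur ++ [p.1])) PySem.Dict.empty)).keys =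
      PySem.List.dedup (l.map (fun p => p.2)) := by
    rw [PySem.Dict.keys_foldl_insert_key l (fun p => p.2)
      (fun d p => let cur := d.getD p.2 []; if p.1 ∈ cur then cur else cur ++ [p.1])
      PySem.Dict.empty]
    simp [PySem.Dict.keys_empty, PySem.Set.update, PySem.List.dedup_eq_ofList,
      PySem.Set.ofList_eq_foldl]
  rw [hkeys]
  apply List.map_congr_left
  intro c _
  rw [getD_foldA]
  simp [PySem.List.dedup_eq_ofList, PySem.Set.ofList_eq_foldl]
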